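-- pv_equiv track=rewrite | github.com/martimfasantos/DS | health_domain/classification/data_profiling/data_granularity.py | do_group_3
-- ===== SOURCE A (Python) =====
-- def do_group_3(counts: list) -> list:
--     new_counts = {'0,30]': 0, '(30,60]': 0, '(60, 100)': 0}
--     for item in counts:
--         if (item[0] in ('[0-10)', '[10-20)', '[20-30)')):
--             new_counts['0,30]'] += item[1]
--         elif (item[0] in ('[30-40)', '[40-50)', '[50-60)')):
--             new_counts['(30,60]'] += item[1]
--         else:
--             new_counts['(60, 100)'] += item[1]
--     return new_counts
-- ===== SOURCE B (Python) =====
-- def do_group_3(counts: list) -> list: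
--     low = ('[0-10)', '[10-20)', '[20-30)')
--     mid = ('[30-40)', '[40-50)', '[50-60)')
--     return {
--         '0,30]': sum(item[1] for item in counts if item[0] in low),
--         '(30,60]': sum(item[1] for item in counts if item[0] in mid),
--         '(60, 100)': sum(item[1] for item in counts
--                          if item[0] not in low and item[0] not in mid),
--     }
-- ===== Notes on version B (the rewrite author's own statement) =====
-- stated objective: alternative
-- what changed: Replaces the single branching loop that mutates a three-key dict with three independent filtered sums, one per bucket, building the result dict in one expression.
import Mathlib
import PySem

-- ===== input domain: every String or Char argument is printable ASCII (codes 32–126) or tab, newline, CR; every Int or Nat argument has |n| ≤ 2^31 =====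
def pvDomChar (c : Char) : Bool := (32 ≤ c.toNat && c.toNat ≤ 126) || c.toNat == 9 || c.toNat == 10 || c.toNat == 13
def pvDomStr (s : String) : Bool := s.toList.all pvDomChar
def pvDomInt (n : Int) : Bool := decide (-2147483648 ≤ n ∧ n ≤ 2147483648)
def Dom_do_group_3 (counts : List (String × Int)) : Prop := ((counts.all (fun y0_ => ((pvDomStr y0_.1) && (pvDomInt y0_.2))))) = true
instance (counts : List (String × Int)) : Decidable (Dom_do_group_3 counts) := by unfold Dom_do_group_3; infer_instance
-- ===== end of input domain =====

-- B rebuilds the three-bucket result with three independent filtered sums (one per bucket)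
-- instead of A's single branching loop over a mutable dict; alternative decomposition, same cost.


-- ===== PORT A =====
-- the loop body: dict test-and-increment, ported with PySem.Dict getD/insert
def pvStepA (d : PySem.Dict String Int) (item : String × Int) : PySem.Dict String Int :=
  if item.1 = "[0-10)" ∨ item.1 = "[10-20)" ∨ item.1 = "[20-30)" then
    d.insert "0,30]" (d.getD "0,30]" 0 + item.2)
  else if item.1 = "[30-40)" ∨ item.1 = "[40-50)" ∨ item.1 = "[50-60)" then
    d.insert "(30,60]" (d.getD "(30,60]" 0 + item.2)
  else
    d.insert "(60, 100)" (d.getD "(60, 100)" 0 + item.2)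

def do_group_3 (counts : List (String × Int)) : List (String × Int) :=
  (counts.foldl pvStepA
    (((PySem.Dict.empty.insert "0,30]" 0).insert "(30,60]" 0).insert "(60, 100)" 0)).items

-- ===== PORT B =====
def pvLow : List String := ["[0-10)", "[10-20)", "[20-30)"]
def pvMid : List String := ["[30-40)", "[40-50)", "[50-60)"]

def do_group_3_alt (counts : List (String × Int)) : List (String × Int) :=
  [("0,30]",    ((counts.filter (fun it => pvLow.contains it.1)).map (·.2)).sum),
   ("(30,60]",  ((counts.filter (fun it => pvMid.contains it.1)).map (·.2)).sum),
   ("(60, 100)", ((counts.filter (fun it => !pvLow.contains it.1 && !pvMid.contains it.1)).map (·.2)).sum)]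

-- ===== PRECONDITION & SPEC =====
def Spec_do_group_3 (counts : List (String × Int)) (out : List (String × Int)) : Prop := out = do_group_3_alt counts
instance (counts : List (String × Int)) (out : List (String × Int)) : Decidable (Spec_do_group_3 counts out) := by unfold Spec_do_group_3; infer_instance

-- ===== CLAIM (what is proved, stated in full; the proofs are below) =====
def Claim_equal_do_group_3 : Prop := ∀ (counts : List (String × Int)), Dom_do_group_3 counts → Spec_do_group_3 counts (do_group_3 counts)

-- ===== LEMMAS AND PROOFS =====
-- invariant of A's loop: starting from the three-key dict with accumulators a, b, c,
-- it adds the per-bucket filtered sums that B computes directly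
theorem pvLoopA (l : List (String × Int)) (a b c : Int) :
    l.foldl pvStepA (PySem.Dict.mk [("0,30]", a), ("(30,60]", b), ("(60, 100)", c)])
    = PySem.Dict.mk
        [("0,30]", a + ((l.filter (fun it => pvLow.contains it.1)).map (·.2)).sum),
         ("(30,60]", b + ((l.filter (fun it => pvMid.contains it.1)).map (·.2)).sum),
         ("(60, 100)", c + ((l.filter (fun it => !pvLow.contains it.1 && !pvMid.contains it.1)).map (·.2)).sum)] := by
  induction l generalizing a b c with
  | nil => simp
  | cons hd tl ih =>
    obtain ⟨s, n⟩ := hd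
    by_cases h1 : s = "[0-10)" ∨ s = "[10-20)" ∨ s = "[20-30)"
    · have hlow : pvLow.contains s = true := by
        rcases h1 with h | h | h <;> simp [pvLow, h]
      have hmid : pvMid.contains s = false := by
        rcases h1 with h | h | h <;> simp [pvMid, h]
      simp only [List.foldl_cons, List.filter_cons, hlow, hmid]
      rw [show pvStepA (PySem.Dict.mk [("0,30]", a), ("(30,60]", b), ("(60, 100)", c)]) (s, n)
            = PySem.Dict.mk [("0,30]", a + n), ("(30,60]", b), ("(60, 100)", c)] by
        simp [pvStepA, h1, PySem.Dict.insert, PySem.Dict.getD, PySem.Dict.get?, PySem.Dict.contains]]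
      rw [ih]
      simp only [Bool.not_true, Bool.false_and]
      simp [List.map_cons, List.sum_cons]
      ring
    · by_cases h2 : s = "[30-40)" ∨ s = "[40-50)" ∨ s = "[50-60)"
      · have hlow : pvLow.contains s = false := by
          rcases h2 with h | h | h <;> simp [pvLow, h]
        have hmid : pvMid.contains s = true := by
          rcases h2 with h | h | h <;> simp [pvMid, h]
        simp only [List.foldl_cons, List.filter_cons, hlow, hmid]
        rw [show pvStepA (PySem.Dict.mk [("0,30]", a), ("(30,60]", b), ("(60, 100)", c)]) (s, n)
              = PySem.Dict.mk [("0,30]", a), ("(30,60]", b + n), ("(60, 100)", c)] by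
          simp [pvStepA, h1, h2, PySem.Dict.insert, PySem.Dict.getD, PySem.Dict.get?, PySem.Dict.contains]]
        rw [ih]
        simp only [Bool.not_true, Bool.and_false]
        simp [List.map_cons, List.sum_cons]
        ring
      · have hlow : pvLow.contains s = false := by
          simp only [pvLow, List.contains_cons, List.contains_nil]
          simp only [not_or] at h1
          simp [h1.1, h1.2.1, h1.2.2]
        have hmid : pvMid.contains s = false := by
          simp only [pvMid, List.contains_cons, List.contains_nil]
          simp only [not_or] at h2
          simp [h2.1, h2.2.1, h2.2.2]
        simp only [List.foldl_cons, List.filter_cons, hlow, hmid]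
        rw [show pvStepA (PySem.Dict.mk [("0,30]", a), ("(30,60]", b), ("(60, 100)", c)]) (s, n)
              = PySem.Dict.mk [("0,30]", a), ("(30,60]", b), ("(60, 100)", c + n)] by
          simp [pvStepA, h1, h2, PySem.Dict.insert, PySem.Dict.getD, PySem.Dict.get?, PySem.Dict.contains]]
        rw [ih]
        simp only [Bool.not_false, Bool.and_self]
        simp [List.map_cons, List.sum_cons]
        ring

-- ===== VERDICT (by name: the statement is the Claim_ definition above) =====
theorem do_group_3_spec : Claim_equal_do_group_3 := by
  intro counts _
  unfold Spec_do_group_3 do_group_3 do_group_3_alt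
  rw [show (((PySem.Dict.empty.insert "0,30]" 0).insert "(30,60]" (0:Int)).insert "(60, 100)" 0)
        = PySem.Dict.mk [("0,30]", 0), ("(30,60]", 0), ("(60, 100)", 0)] from rfl]
  rw [pvLoopA]
  simp
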